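-- pv_equiv track=rewrite | github.com/JBGUIMBAUD/ML_based_ECRS_in_European_children | utils.py | compute_vartypes_x_families_mapping
-- ===== SOURCE A (Python) =====
-- def compute_vartypes_x_families_mapping(families: list, category=None):
--     vartypes_x_families = {'Clinical factors': [],
--                                  'Metabolites/Proteins': [],
--                                  'Exposures': [],
--                                  'Covariates': []}
--     for index, familly in enumerate(families):
--         if familly in ['Clinical factors (respi)', 'Clinical factors (mental)', 'Parental clinical factors (mental)', 'Clinical factors (cardio)', 'Lipids', 'Clinical factors', 'Parental clinical factors']:
--             vartype = 'Clinical factors'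
--         elif familly in ['Proteome', 'Serum metabolome', 'Urine metabolome']:
--             vartype = 'Metabolites/Proteins'
--         elif familly == 'Covariates':
--             vartype = 'Covariates'
--         else:
--             vartype = 'Exposures'
--
--         # indices = [features_names.index(col) for col in familly_x_variable_name_mapping[familly]]
--         # vartypes_x_variable_names[vartype].extend(indices)
--
--         vartypes_x_families[vartype].append(familly)
--     return vartypes_x_families
-- ===== SOURCE B (Python) =====
-- CLINICAL = {'Clinical factors (respi)', 'Clinical factors (mental)', 'Parental clinical factors (mental)', 'Clinical factors (cardio)', 'Lipids', 'Clinical factors', 'Parental clinical factors'}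
-- METPROT = {'Proteome', 'Serum metabolome', 'Urine metabolome'}
--
-- def compute_vartypes_x_families_mapping(families: list, category=None):
--     return {
--         'Clinical factors': [f for f in families if f in CLINICAL],
--         'Metabolites/Proteins': [f for f in families if f in METPROT],
--         'Exposures': [f for f in families
--                       if f not in CLINICAL and f not in METPROT and f != 'Covariates'],
--         'Covariates': [f for f in families if f == 'Covariates'],
--     }
-- ===== Notes on version B (the rewrite author's own statement) =====
-- stated objective: simpler
-- what changed: Replaces the single classifying loop that appends into a mutable dict with four independent filtered list comprehensions, one per bucket, assembled directly into the result dict.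
import Mathlib
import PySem

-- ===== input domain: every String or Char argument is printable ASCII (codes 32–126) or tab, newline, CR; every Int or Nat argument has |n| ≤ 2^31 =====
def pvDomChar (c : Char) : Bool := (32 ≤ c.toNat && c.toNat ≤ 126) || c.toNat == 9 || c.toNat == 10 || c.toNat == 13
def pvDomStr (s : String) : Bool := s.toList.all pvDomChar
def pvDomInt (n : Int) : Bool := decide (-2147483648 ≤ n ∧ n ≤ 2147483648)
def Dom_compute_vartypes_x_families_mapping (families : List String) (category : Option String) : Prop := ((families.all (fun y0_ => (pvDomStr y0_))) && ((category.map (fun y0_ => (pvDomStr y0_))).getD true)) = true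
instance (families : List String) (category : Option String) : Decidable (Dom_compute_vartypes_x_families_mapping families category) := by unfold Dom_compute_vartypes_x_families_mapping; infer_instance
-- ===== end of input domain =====

-- B replaces A's single classifying loop over a mutable dict with four independent
-- filtered passes, one per bucket (objective: simpler; same asymptotic cost).

-- ===== PORT A =====
-- A's loop body: classify one family and append it to its bucket in the dict.
def pvStepA (d : PySem.Dict String (List String)) (p : Int × String) : PySem.Dict String (List String) :=
  let familly := p.2
  let vartype :=
    if familly ∈ (["Clinical factors (respi)", "Clinical factors (mental)", "Parental clinical factors (mental)", "Clinical factors (cardio)", "Lipids", "Clinical factors", "Parental clinical factors"] : List String) then "Clinical factors"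
    else if familly ∈ (["Proteome", "Serum metabolome", "Urine metabolome"] : List String) then "Metabolites/Proteins"
    else if familly = "Covariates" then "Covariates"
    else "Exposures"
  d.modify vartype [] (fun l => l ++ [familly])

def compute_vartypes_x_families_mapping (families : List String) (category : Option String) : List (String × List String) :=
  let init : PySem.Dict String (List String) :=
    ((((PySem.Dict.empty.insert "Clinical factors" []).insert "Metabolites/Proteins" []).insert "Exposures" []).insert "Covariates" [])
  ((PySem.List.enumerate families).foldl pvStepA init).items

-- ===== PORT B =====
def pvClinical : List String := ["Clinical factors (respi)", "Clinical factors (mental)", "Parental clinical factors (mental)", "Clinical factors (cardio)", "Lipids", "Clinical factors", "Parental clinical factors"]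
def pvMetProt : List String := ["Proteome", "Serum metabolome", "Urine metabolome"]

def compute_vartypes_x_families_mapping_alt (families : List String) (category : Option String) : List (String × List String) :=
  [("Clinical factors", families.filter (fun f => decide (f ∈ pvClinical))),
   ("Metabolites/Proteins", families.filter (fun f => decide (f ∈ pvMetProt))),
   ("Exposures", families.filter (fun f => decide (f ∉ pvClinical ∧ f ∉ pvMetProt ∧ f ≠ "Covariates"))),
   ("Covariates", families.filter (fun f => f == "Covariates"))]

-- ===== PRECONDITION & SPEC =====
def Spec_compute_vartypes_x_families_mapping (families : List String) (category : Option String) (out : List (String × List String)) : Prop := out = compute_vartypes_x_families_mapping_alt families category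
instance (families : List String) (category : Option String) (out : List (String × List String)) : Decidable (Spec_compute_vartypes_x_families_mapping families category out) := by unfold Spec_compute_vartypes_x_families_mapping; infer_instance

-- ===== CLAIM (what is proved, stated in full; the proofs are below) =====
def Claim_equal_compute_vartypes_x_families_mapping : Prop := ∀ (families : List String) (category : Option String), Dom_compute_vartypes_x_families_mapping families category → Spec_compute_vartypes_x_families_mapping families category (compute_vartypes_x_families_mapping families category)

-- ===== LEMMAS AND PROOFS =====

-- Loop invariant: running A's loop from a dict with the four buckets holding c, m, e, v
-- appends to each bucket exactly the families its filter keeps, in order.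

theorem pvStepA_cases (f : String) (i : Int) (c m e v : List String) :
    pvStepA (PySem.Dict.mk [("Clinical factors", c), ("Metabolites/Proteins", m), ("Exposures", e), ("Covariates", v)]) (i, f)
    = if f ∈ pvClinical then PySem.Dict.mk [("Clinical factors", c ++ [f]), ("Metabolites/Proteins", m), ("Exposures", e), ("Covariates", v)]
      else if f ∈ pvMetProt then PySem.Dict.mk [("Clinical factors", c), ("Metabolites/Proteins", m ++ [f]), ("Exposures", e), ("Covariates", v)]
      else if f = "Covariates" then PySem.Dict.mk [("Clinical factors", c), ("Metabolites/Proteins", m), ("Exposures", e), ("Covariates", v ++ [f])]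
      else PySem.Dict.mk [("Clinical factors", c), ("Metabolites/Proteins", m), ("Exposures", e ++ [f]), ("Covariates", v)] := by
  unfold pvStepA pvClinical pvMetProt
  dsimp only
  split_ifs <;> rfl

theorem pvLoopA (fams : List String) (i : Int) (c m e v : List String) :
    ((PySem.List.enumerate fams i).foldl pvStepA
      (PySem.Dict.mk [("Clinical factors", c), ("Metabolites/Proteins", m), ("Exposures", e), ("Covariates", v)])).items
    = [("Clinical factors", c ++ fams.filter (fun f => decide (f ∈ pvClinical))),
       ("Metabolites/Proteins", m ++ fams.filter (fun f => decide (f ∈ pvMetProt))),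
       ("Exposures", e ++ fams.filter (fun f => decide (f ∉ pvClinical ∧ f ∉ pvMetProt ∧ f ≠ "Covariates"))),
       ("Covariates", v ++ fams.filter (fun f => f == "Covariates"))] := by
  induction fams generalizing i c m e v with
  | nil => simp [PySem.List.enumerate_nil]
  | cons f fs ih =>
    rw [PySem.List.enumerate_cons, List.foldl_cons, pvStepA_cases]
    by_cases h1 : f ∈ pvClinical
    · have hm : f ∉ pvMetProt := by fin_cases h1 <;> decide
      have hv : f ≠ "Covariates" := by fin_cases h1 <;> decide
      simp [h1, hm, hv, ih]
    · by_cases h2 : f ∈ pvMetProt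
      · have hv : f ≠ "Covariates" := by fin_cases h2 <;> decide
        simp [h1, h2, hv, ih]
      · by_cases h3 : f = "Covariates"
        · subst h3
          simp only [reduceIte, if_neg (by decide : ¬("Covariates" ∈ pvClinical)), if_neg (by decide : ¬("Covariates" ∈ pvMetProt))]
          simp [h1, h2, ih]
        · simp [h1, h2, h3, ih]

theorem compute_vartypes_x_families_mapping_spec : Claim_equal_compute_vartypes_x_families_mapping := by
  intro families category _
  show compute_vartypes_x_families_mapping families category = _
  have hinit : compute_vartypes_x_families_mapping families category
      = ((PySem.List.enumerate families).foldl pvStepA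
          (PySem.Dict.mk [("Clinical factors", []), ("Metabolites/Proteins", []), ("Exposures", []), ("Covariates", [])])).items := rfl
  rw [hinit, pvLoopA]
  simp [compute_vartypes_x_families_mapping_alt]
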